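-- pv_equiv track=rewrite | github.com/opensecurityarchitecture/osa-data | scripts/add-control-links.py | is_inside_a_tag
-- ===== SOURCE A (Python) =====
-- def is_inside_a_tag(text, pos):
--     """Check if position is already inside an <a ...>...</a> element."""
--     # Search backwards — if we hit <a before </a>, we're inside one
--     i = pos
--     while i >= 0:
--         if text[i] == '>':
--             if i >= 3 and text[i-3:i+1] == '</a>':
--                 return False  # closed <a> before us — not inside
--             j = i
--             while j > 0 and text[j-1] != '<':
--                 j -= 1
--             j -= 1
--             if j >= 0:
--                 tag = text[j:i+1]
--                 if tag.startswith('<a ') or tag == '<a>':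
--                     return True  # open <a> before us — inside
--         i -= 1
--     return False
-- ===== SOURCE B (Python) =====
-- def is_inside_a_tag(text, pos):
--     """Check if position is already inside an <a ...>...</a> element.
--
--     One forward pass: remember the index of the most recent '<'; at each '>'
--     judge the tag ending there (open <a ...> / closing </a>); the verdict of
--     the last decisive tag before pos wins."""
--     ans = False
--     last_lt = -1  # index of the most recent '<' seen so far
--     for i in range(pos + 1):
--         c = text[i]
--         if c == '<':
--             last_lt = i
--         elif c == '>':
--             if i >= 3 and text[i-3:i+1] == '</a>':
--                 ans = False
--             elif last_lt >= 0:
--                 tag = text[last_lt:i+1]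
--                 if tag.startswith('<a ') or tag == '<a>':
--                     ans = True
--     return ans
-- ===== Notes on version B (the rewrite author's own statement) =====
-- stated objective: alternative
-- what changed: Replaces the backward scan with its nested backward nearest-'<' search at every '>' by a single forward pass that maintains the index of the last '<' seen and a last-decision-wins accumulator.
import Mathlib
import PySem

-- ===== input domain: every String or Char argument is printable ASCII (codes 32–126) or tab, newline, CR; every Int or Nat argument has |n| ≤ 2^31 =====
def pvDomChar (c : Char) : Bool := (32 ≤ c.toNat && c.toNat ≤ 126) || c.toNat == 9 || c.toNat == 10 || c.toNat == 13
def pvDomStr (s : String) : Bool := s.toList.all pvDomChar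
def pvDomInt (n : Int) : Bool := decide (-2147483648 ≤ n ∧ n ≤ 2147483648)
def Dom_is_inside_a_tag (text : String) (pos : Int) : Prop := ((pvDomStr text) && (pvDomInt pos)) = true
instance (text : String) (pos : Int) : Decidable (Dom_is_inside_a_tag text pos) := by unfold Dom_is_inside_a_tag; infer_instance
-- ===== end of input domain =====

-- B replaces A's backward scan (with a nested nearest-'<' search at every '>') by one
-- forward pass keeping the last '<' index and a last-decision-wins accumulator.

-- ===== PORT A =====
-- inner while loop: j = i; while j > 0 and text[j-1] != '<': j -= 1   (returns final j)
def aFindLt (cs : List Char) : Nat → Nat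
  | 0 => 0
  | j + 1 => if cs.getD j ' ' ≠ '<' then aFindLt cs j else j + 1

-- outer while loop, fuel = i + 1 (current index is the fuel's predecessor)
def aLoop (cs : List Char) : Nat → Bool
  | 0 => false
  | i + 1 =>
    if cs.getD i ' ' = '>' then
      if 3 ≤ (i : Int) ∧
          PySem.List.slice cs (some ((i : Int) - 3)) (some ((i : Int) + 1)) = ['<', '/', 'a', '>'] then
        false
      else
        let j : Int := (aFindLt cs i : Int) - 1
        if 0 ≤ j ∧
            (let tag := PySem.List.slice cs (some j) (some ((i : Int) + 1))
             PySem.Chars.startswith tag ['<', 'a', ' '] = true ∨ tag = ['<', 'a', '>']) then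
          true
        else aLoop cs i
    else aLoop cs i

def is_inside_a_tag (text : String) (pos : Int) : Bool :=
  aLoop text.toList (pos + 1).toNat

-- ===== PORT B =====
-- one iteration of B's for-loop; state = (ans, last_lt)
def bStep (cs : List Char) (st : Bool × Int) (i : Nat) : Bool × Int :=
  let c := cs.getD i ' '
  if c = '<' then (st.1, (i : Int))
  else if c = '>' then
    if 3 ≤ (i : Int) ∧
        PySem.List.slice cs (some ((i : Int) - 3)) (some ((i : Int) + 1)) = ['<', '/', 'a', '>'] then
      (false, st.2)
    else if 0 ≤ st.2 ∧
        (let tag := PySem.List.slice cs (some st.2) (some ((i : Int) + 1))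
         PySem.Chars.startswith tag ['<', 'a', ' '] = true ∨ tag = ['<', 'a', '>']) then
      (true, st.2)
    else st
  else st

def is_inside_a_tag_alt (text : String) (pos : Int) : Bool :=
  ((List.range (pos + 1).toNat).foldl (bStep text.toList) (false, -1)).1

-- ===== PRECONDITION & SPEC =====
-- Pre_: both Pythons raise IndexError when pos ≥ len(text) (A at text[pos], B at text[i]); excluded.
def Pre_is_inside_a_tag (text : String) (pos : Int) : Prop := pos < PySem.Str.len text
instance (text : String) (pos : Int) : Decidable (Pre_is_inside_a_tag text pos) := by
  unfold Pre_is_inside_a_tag; infer_instance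

def pvWitness_is_inside_a_tag : String × Int := ("<a href=x>hello</a>", 12)

def Spec_is_inside_a_tag (text : String) (pos : Int) (out : Bool) : Prop := out = is_inside_a_tag_alt text pos
instance (text : String) (pos : Int) (out : Bool) : Decidable (Spec_is_inside_a_tag text pos out) := by unfold Spec_is_inside_a_tag; infer_instance

-- ===== CLAIM (what is proved, stated in full; the proofs are below) =====
def Claim_equal_is_inside_a_tag : Prop := ∀ (text : String) (pos : Int), Dom_is_inside_a_tag text pos → Pre_is_inside_a_tag text pos → Spec_is_inside_a_tag text pos (is_inside_a_tag text pos)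

-- ===== LEMMAS AND PROOFS =====

-- B's state after the first n steps
def bState (cs : List Char) (n : Nat) : Bool × Int :=
  (List.range n).foldl (bStep cs) (false, -1)

theorem bState_succ (cs : List Char) (n : Nat) :
    bState cs (n + 1) = bStep cs (bState cs n) n := by
  simp [bState, List.range_succ]

-- B's maintained last_lt equals (the Int form of) A's inner backward search
theorem bState_snd (cs : List Char) (n : Nat) :
    (bState cs n).2 = (aFindLt cs n : Int) - 1 := by
  induction n with
  | zero => simp [bState, aFindLt]
  | succ n ih =>
    rw [bState_succ]
    simp only [bStep, aFindLt]
    by_cases hlt : cs.getD n ' ' = '<'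
    · simp only [if_pos hlt, if_neg (not_not_intro hlt)]
      push_cast; ring
    · simp only [if_neg hlt, if_pos hlt]
      by_cases hgt : cs.getD n ' ' = '>'
      · simp only [if_pos hgt]
        split_ifs <;> simp [ih]
      · simp only [if_neg hgt]
        exact ih

-- B's accumulator after n steps equals A's backward scan from index n - 1
theorem bState_fst (cs : List Char) (n : Nat) :
    (bState cs n).1 = aLoop cs n := by
  induction n with
  | zero => simp [bState, aLoop]
  | succ n ih =>
    rw [bState_succ]
    simp only [bStep, aLoop]
    by_cases hlt : cs.getD n ' ' = '<'
    · have hgt : ¬ cs.getD n ' ' = '>' := by rw [hlt]; decide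
      simp only [if_pos hlt, if_neg hgt]
      simpa using ih
    · by_cases hgt : cs.getD n ' ' = '>'
      · simp only [if_neg hlt, if_pos hgt, bState_snd]
        split_ifs <;> simp [ih]
      · simp only [if_neg hlt, if_neg hgt]
        exact ih

-- ===== VERDICT (by name: the statement is the Claim_ definition above) =====
theorem is_inside_a_tag_spec : Claim_equal_is_inside_a_tag := by
  intro text pos _ _
  unfold Spec_is_inside_a_tag is_inside_a_tag is_inside_a_tag_alt
  exact (bState_fst text.toList (pos + 1).toNat).symm
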